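-- pv_equiv track=rewrite | github.com/csiro-easi/ccog | ccog/ccog.py | _get_maximum_overview_level
-- ===== SOURCE A (Python) =====
-- from typing import Dict, List, Optional, Tuple, Union
--
-- def _get_maximum_overview_level(
--     width: int, height: int, minsize: int = 256, overview_count: Optional[int] = None
-- ) -> int:
--     """
--     Calculate the maximum overview level of a dataset at which
--     the smallest overview is smaller than `minsize`.
--
--     Based on rasterio.rio.overview.get_maximum_overview_level
--     modified to match the behavior of the gdal COG driver
--     so that the smallest overview is smaller than `minsize` in BOTH width and height.
--
--     Parameters:
--     ----------
--     width : int
--         Width of the dataset.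
--     height : int
--         Height of the dataset.
--     minsize : int (default: 256)
--         Minimum overview size.
--     overview_count: Optional[int] (default: None)
--         The maximum overview level to generate.
--
--     Returns:
--     -------
--     overview_level: int
--         Overview level.
--     """
--     # note GDAL seems to have a limit of an overview level of 30
--
--     # GDAL will keep producing overviews for single pixel strands of data longer then blocksize.
--     # this is a bit odd because the resampling doesnt make sense
--
--     overview_level = 0
--     overview_factor = 1
--     if overview_count is not None:
--         while overview_count > overview_level and max(width // overview_factor, height // overview_factor) > 1:
--             overview_factor *= 2
--             overview_level += 1
--             # print (width // overview_factor, height // overview_factor)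
--     else:
--         while max(width // overview_factor, height // overview_factor) > minsize:
--             overview_factor *= 2
--             overview_level += 1
--
--     return overview_level
-- ===== SOURCE B (Python) =====
-- def _get_maximum_overview_level(width, height, minsize=256, overview_count=None):
--     """Closed-form version: levels computed via bit_length instead of halving loops."""
--     m = max(width, height)
--     if overview_count is not None:
--         full = m.bit_length() - 1 if m >= 2 else 0
--         return min(max(overview_count, 0), full)
--     if m <= minsize:
--         return 0
--     return (m // (minsize + 1)).bit_length()
-- ===== Notes on version B (the rewrite author's own statement) =====
-- stated objective: alternative
-- what changed: Replaces A's two halving while-loops by a closed-form answer computed with int.bit_length (level = bit_length(max(w,h)//(minsize+1)), resp. min(overview_count, bit_length(m)-1)).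
-- outside the precondition, e.g. on _get_maximum_overview_level(1000, 1000, -5, None): A does not finish within the time limit, B returns 8
import Mathlib
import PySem

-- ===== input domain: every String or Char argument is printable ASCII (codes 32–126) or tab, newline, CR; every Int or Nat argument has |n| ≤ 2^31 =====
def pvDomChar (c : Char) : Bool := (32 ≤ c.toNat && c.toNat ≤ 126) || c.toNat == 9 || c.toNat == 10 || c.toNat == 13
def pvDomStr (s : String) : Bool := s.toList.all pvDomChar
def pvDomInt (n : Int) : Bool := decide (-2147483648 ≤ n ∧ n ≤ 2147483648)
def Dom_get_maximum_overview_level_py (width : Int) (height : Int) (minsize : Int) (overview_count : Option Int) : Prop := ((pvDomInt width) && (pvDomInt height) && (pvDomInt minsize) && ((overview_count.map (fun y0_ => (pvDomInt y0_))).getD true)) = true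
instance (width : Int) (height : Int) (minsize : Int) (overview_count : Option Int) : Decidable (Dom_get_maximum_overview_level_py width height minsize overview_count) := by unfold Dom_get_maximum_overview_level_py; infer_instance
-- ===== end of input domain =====

-- B replaces A's two halving while-loops by closed-form bit_length arithmetic (objective: alternative — O(1) arithmetic instead of a halving loop; too fast either way to time).

-- ===== PORT A =====
-- A's first while loop (overview_count is not None); fuel only makes the recursion total,
-- it is never exhausted on inputs admitted by Dom ∧ Pre (≤ 32 iterations there).
def pvLoopOC (oc width height : Int) : Nat → Int → Int → Int
  | 0, level, _ => level
  | fuel + 1, level, factor =>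
    if oc > level ∧ max (PySem.Int.floordiv width factor) (PySem.Int.floordiv height factor) > 1 then
      pvLoopOC oc width height fuel (level + 1) (factor * 2)
    else level

-- A's second while loop (overview_count is None)
def pvLoopMS (minsize width height : Int) : Nat → Int → Int → Int
  | 0, level, _ => level
  | fuel + 1, level, factor =>
    if max (PySem.Int.floordiv width factor) (PySem.Int.floordiv height factor) > minsize then
      pvLoopMS minsize width height fuel (level + 1) (factor * 2)
    else level

def get_maximum_overview_level_py (width : Int) (height : Int) (minsize : Int) (overview_count : Option Int) : Int :=
  match overview_count with
  | some oc => pvLoopOC oc width height 64 0 1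
  | none => pvLoopMS minsize width height 64 0 1

-- ===== PORT B =====
def get_maximum_overview_level_py_alt (width : Int) (height : Int) (minsize : Int) (overview_count : Option Int) : Int :=
  let m := max width height
  match overview_count with
  | some oc =>
    let full : Int := if 2 ≤ m then (PySem.Int.bitLength m : Int) - 1 else 0
    min (max oc 0) full
  | none =>
    if m ≤ minsize then 0
    else ((PySem.Int.bitLength (PySem.Int.floordiv m (minsize + 1)) : Nat) : Int)

-- ===== PRECONDITION & SPEC =====
-- Pre_ excludes only the inputs on which A loops FOREVER (no return at all): overview_count = None with
-- minsize negative while max(width,height) ≥ 0, or minsize ≤ -2 — there max(width,height)//factor never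
-- drops to the threshold.  A returns on every input Pre_ admits.
def Pre_get_maximum_overview_level_py (width : Int) (height : Int) (minsize : Int) (overview_count : Option Int) : Prop :=
  overview_count ≠ none ∨ 0 ≤ minsize ∨ (minsize = -1 ∧ max width height < 0)
instance (width : Int) (height : Int) (minsize : Int) (overview_count : Option Int) : Decidable (Pre_get_maximum_overview_level_py width height minsize overview_count) := by unfold Pre_get_maximum_overview_level_py; infer_instance

def pvWitness_get_maximum_overview_level_py : Int × Int × Int × Option Int := (4096, 1024, 256, none)

def Spec_get_maximum_overview_level_py (width : Int) (height : Int) (minsize : Int) (overview_count : Option Int) (out : Int) : Prop := out = get_maximum_overview_level_py_alt width height minsize overview_count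
instance (width : Int) (height : Int) (minsize : Int) (overview_count : Option Int) (out : Int) : Decidable (Spec_get_maximum_overview_level_py width height minsize overview_count out) := by unfold Spec_get_maximum_overview_level_py; infer_instance

-- ===== CLAIM (what is proved, stated in full; the proofs are below) =====
def Claim_equal_get_maximum_overview_level_py : Prop := ∀ (width : Int) (height : Int) (minsize : Int) (overview_count : Option Int), Dom_get_maximum_overview_level_py width height minsize overview_count → Pre_get_maximum_overview_level_py width height minsize overview_count → Spec_get_maximum_overview_level_py width height minsize overview_count (get_maximum_overview_level_py width height minsize overview_count)

-- ===== LEMMAS AND PROOFS =====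

-- max distributes over floor division by a positive divisor
theorem pv_max_floordiv (w h f : Int) (hf : 0 < f) :
    max (PySem.Int.floordiv w f) (PySem.Int.floordiv h f) = PySem.Int.floordiv (max w h) f := by
  simp only [PySem.Int.floordiv_eq_ediv_of_pos hf]
  rcases le_total w h with hle | hle
  · rw [max_eq_right hle, max_eq_right (Int.ediv_le_ediv hf hle)]
  · rw [max_eq_left hle, max_eq_left (Int.ediv_le_ediv hf hle)]

-- bit_length brackets, cast to Int, for positive x
theorem pv_bitLength_bounds (x : Int) (hx : 0 < x) :
    (2 : Int) ^ (PySem.Int.bitLength x - 1) ≤ x ∧ x < (2 : Int) ^ PySem.Int.bitLength x := by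
  have hxa : ((x.natAbs : Nat) : Int) = x := Int.natAbs_of_nonneg (le_of_lt hx)
  constructor
  · have h := PySem.Int.two_pow_bitLength_le x (by omega)
    calc (2 : Int) ^ (PySem.Int.bitLength x - 1)
        = (((2 : Nat) ^ (PySem.Int.bitLength x - 1) : Nat) : Int) := by push_cast; ring
      _ ≤ ((x.natAbs : Nat) : Int) := by exact_mod_cast h
      _ = x := hxa
  · have h := PySem.Int.lt_two_pow_bitLength x
    calc x = ((x.natAbs : Nat) : Int) := hxa.symm
      _ < (((2 : Nat) ^ PySem.Int.bitLength x : Nat) : Int) := by exact_mod_cast h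
      _ = (2 : Int) ^ PySem.Int.bitLength x := by push_cast; ring

theorem pv_bitLength_le32 (x : Int) (hx : 0 < x) (hub : x ≤ 2147483648) :
    PySem.Int.bitLength x ≤ 32 := by
  by_contra h
  push_neg at h
  have h1 := (pv_bitLength_bounds x hx).1
  have h2 : (2 : Int) ^ 32 ≤ 2 ^ (PySem.Int.bitLength x - 1) :=
    pow_le_pow_right₀ (by norm_num) (by omega)
  norm_num at h2
  omega

-- the minsize loop, run from level j with factor 2^j, stops exactly at the minimal stopping level K
theorem pv_loopMS_from (minsize w h : Int) (K : Nat)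
    (hK : PySem.Int.floordiv (max w h) (2 ^ K) ≤ minsize)
    (hlt : ∀ j : Nat, j < K → minsize < PySem.Int.floordiv (max w h) (2 ^ j)) :
    ∀ (fuel j : Nat), j ≤ K → K ≤ j + fuel →
      pvLoopMS minsize w h fuel (j : Int) (2 ^ j) = (K : Int) := by
  intro fuel
  induction fuel with
  | zero =>
    intro j hjK hKj
    have : j = K := by omega
    simp [pvLoopMS, this]
  | succ n ih =>
    intro j hjK hKj
    rw [pvLoopMS, pv_max_floordiv _ _ _ (by positivity)]
    by_cases hj : j < K
    · rw [if_pos (hlt j hj)]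
      have hcast : (j : Int) + 1 = ((j + 1 : Nat) : Int) := by push_cast; ring
      rw [hcast, show (2 : Int) ^ j * 2 = 2 ^ (j + 1) by rw [pow_succ]]
      exact ih (j + 1) (by omega) (by omega)
    · have hjK' : j = K := by omega
      subst hjK'
      rw [if_neg (by omega)]

-- the overview_count loop, run from level j with factor 2^j, stops exactly at level K
theorem pv_loopOC_from (oc w h : Int) (K : Nat)
    (hK : oc ≤ (K : Int) ∨ PySem.Int.floordiv (max w h) (2 ^ K) ≤ 1)
    (hlt : ∀ j : Nat, j < K → (j : Int) < oc ∧ 1 < PySem.Int.floordiv (max w h) (2 ^ j)) :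
    ∀ (fuel j : Nat), j ≤ K → K ≤ j + fuel →
      pvLoopOC oc w h fuel (j : Int) (2 ^ j) = (K : Int) := by
  intro fuel
  induction fuel with
  | zero =>
    intro j hjK hKj
    have : j = K := by omega
    simp [pvLoopOC, this]
  | succ n ih =>
    intro j hjK hKj
    rw [pvLoopOC, pv_max_floordiv _ _ _ (by positivity)]
    by_cases hj : j < K
    · obtain ⟨h1, h2⟩ := hlt j hj
      rw [if_pos ⟨h1, h2⟩]
      have hcast : (j : Int) + 1 = ((j + 1 : Nat) : Int) := by push_cast; ring
      rw [hcast, show (2 : Int) ^ j * 2 = 2 ^ (j + 1) by rw [pow_succ]]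
      exact ih (j + 1) (by omega) (by omega)
    · have hjK' : j = K := by omega
      subst hjK'
      rw [if_neg (by rcases hK with h | h <;> omega)]

-- ===== VERDICT (by name: the statement is the Claim_ definition above) =====
theorem get_maximum_overview_level_py_spec : Claim_equal_get_maximum_overview_level_py := by
  intro width height minsize overview_count hdom hpre
  unfold Spec_get_maximum_overview_level_py
  unfold Dom_get_maximum_overview_level_py at hdom
  rcases overview_count with _ | oc
  · -- overview_count = None
    simp only [pvDomInt, Option.map_none, Option.getD_none, Bool.and_eq_true, decide_eq_true_eq] at hdom
    obtain ⟨⟨⟨hw, hh⟩, hms'⟩, _⟩ := hdom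
    set m : Int := max width height with hm
    have hmub : m ≤ 2147483648 := by rw [hm]; omega
    simp only [get_maximum_overview_level_py, get_maximum_overview_level_py_alt]
    rw [← hm]
    by_cases hstop : m ≤ minsize
    · have hres := pv_loopMS_from minsize width height 0 ?_ (by omega) 64 0 (by omega) (by omega)
      · rw [show ((0 : Nat) : Int) = 0 from rfl, show (2 : Int) ^ (0 : Nat) = 1 by norm_num] at hres
        rw [hres, if_pos hstop]
      · rw [← hm, pow_zero]
        have := (PySem.Int.floordiv_lt_iff_lt_mul (a := m) (b := 1) (q := minsize + 1) (by norm_num)).mpr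
          (by omega)
        omega
    · push_neg at hstop
      have hms : 0 ≤ minsize := by
        rcases hpre with h | h | ⟨h1, h2⟩
        · simp at h
        · exact h
        · rw [← hm] at h2; omega
      set t : Int := PySem.Int.floordiv m (minsize + 1) with ht
      have htpos : 1 ≤ t := by
        have := (PySem.Int.le_floordiv_iff_mul_le (a := m) (b := minsize + 1) (q := 1) (by omega)).mpr (by omega)
        omega
      have htub : t ≤ 2147483648 := by
        rw [ht, PySem.Int.floordiv_eq_ediv_of_pos (by omega)]
        have := Int.ediv_le_self (minsize + 1) (show (0:Int) ≤ m by omega)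
        omega
      set K : Nat := PySem.Int.bitLength t with hK
      obtain ⟨hge2K, hlt2K⟩ := pv_bitLength_bounds t (by omega)
      have hKpos : 1 ≤ K := by
        by_contra hc
        have hK0 : K = 0 := by omega
        rw [← hK, hK0] at hlt2K
        norm_num at hlt2K
        omega
      have hKle : K ≤ 32 := pv_bitLength_le32 t (by omega) htub
      rw [← hK] at hge2K hlt2K
      have hres := pv_loopMS_from minsize width height K ?_ ?_ 64 0 (by omega) (by omega)
      · rw [show ((0 : Nat) : Int) = 0 from rfl, show (2 : Int) ^ (0 : Nat) = 1 by norm_num] at hres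
        rw [hres, if_neg (by omega)]
      · -- m // 2^K ≤ minsize from t < 2^K
        rw [← hm]
        have h1 : m < 2 ^ K * (minsize + 1) :=
          (PySem.Int.floordiv_lt_iff_lt_mul (a := m) (b := minsize + 1) (q := 2 ^ K) (by omega)).mp (ht ▸ hlt2K)
        have h2 : PySem.Int.floordiv m (2 ^ K) < minsize + 1 :=
          (PySem.Int.floordiv_lt_iff_lt_mul (a := m) (b := 2 ^ K) (q := minsize + 1) (by positivity)).mpr (by rw [mul_comm]; exact h1)
        omega
      · intro j hj
        rw [← hm]
        have hA : t * (minsize + 1) ≤ m :=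
          (PySem.Int.le_floordiv_iff_mul_le (a := m) (b := minsize + 1) (q := t) (by omega)).mp (le_of_eq ht)
        have hB : (2 : Int) ^ j ≤ 2 ^ (K - 1) := pow_le_pow_right₀ (by norm_num) (by omega)
        have hC : (minsize + 1) * 2 ^ j ≤ m := by nlinarith
        have := (PySem.Int.le_floordiv_iff_mul_le (a := m) (b := 2 ^ j) (q := minsize + 1)
          (show (0:Int) < 2 ^ j by positivity)).mpr (by nlinarith)
        omega
  · -- overview_count = some oc
    simp only [pvDomInt, Option.map_some, Option.getD_some, Bool.and_eq_true, decide_eq_true_eq] at hdom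
    obtain ⟨⟨⟨hw, hh⟩, _⟩, _⟩ := hdom
    set m : Int := max width height with hm
    have hmub : m ≤ 2147483648 := by rw [hm]; omega
    simp only [get_maximum_overview_level_py, get_maximum_overview_level_py_alt]
    rw [← hm]
    by_cases h2 : 2 ≤ m
    · obtain ⟨hge2, hlt2⟩ := pv_bitLength_bounds m (by omega)
      have hblle : PySem.Int.bitLength m ≤ 32 := pv_bitLength_le32 m (by omega) hmub
      have hblpos : 1 ≤ PySem.Int.bitLength m := by
        by_contra hc
        have hB0 : PySem.Int.bitLength m = 0 := by omega
        rw [hB0] at hlt2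
        norm_num at hlt2
        omega
      set full : Nat := PySem.Int.bitLength m - 1 with hfull
      have hfullge : (2 : Int) ^ full ≤ m := hge2
      have hfulllt : m < (2 : Int) ^ (full + 1) := by
        rw [show full + 1 = PySem.Int.bitLength m by omega]
        exact hlt2
      set K : Nat := min oc.toNat full with hKdef
      have hres := pv_loopOC_from oc width height K ?_ ?_ 64 0 (by omega) (by omega)
      · rw [show ((0 : Nat) : Int) = 0 from rfl, show (2 : Int) ^ (0 : Nat) = 1 by norm_num] at hres
        rw [hres, if_pos h2]
        have hmax := Int.toNat_eq_max oc
        omega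
      · -- stop at K : oc ≤ K or m // 2^K ≤ 1
        rcases le_total oc.toNat full with hc | hc
        · left
          have := Int.toNat_eq_max oc
          omega
        · right
          rw [← hm]
          have hKf : K = full := by omega
          have h1 : PySem.Int.floordiv m (2 ^ K) < 2 :=
            (PySem.Int.floordiv_lt_iff_lt_mul (a := m) (b := 2 ^ K) (q := 2) (by positivity)).mpr
              (by rw [hKf, show (2 : Int) * 2 ^ full = 2 ^ (full + 1) by rw [pow_succ]; ring]
                  exact hfulllt)
          omega
      · intro j hj
        constructor
        · have := Int.toNat_eq_max oc
          omega
        · rw [← hm]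
          have h1 : (2 : Int) * 2 ^ j ≤ m := by
            calc (2 : Int) * 2 ^ j = 2 ^ (j + 1) := by rw [pow_succ]; ring
              _ ≤ 2 ^ full := pow_le_pow_right₀ (by norm_num) (by omega)
              _ ≤ m := hfullge
          have := (PySem.Int.le_floordiv_iff_mul_le (a := m) (b := 2 ^ j) (q := 2)
            (show (0:Int) < 2 ^ j by positivity)).mpr h1
          omega
    · push_neg at h2
      have hres := pv_loopOC_from oc width height 0 ?_ (by omega) 64 0 (by omega) (by omega)
      · rw [show ((0 : Nat) : Int) = 0 from rfl, show (2 : Int) ^ (0 : Nat) = 1 by norm_num] at hres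
        rw [hres, if_neg (by omega)]
        omega
      · right
        rw [← hm, pow_zero]
        have := (PySem.Int.floordiv_lt_iff_lt_mul (a := m) (b := 1) (q := 2) (by norm_num)).mpr (by omega)
        omega
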